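-- pv_equiv track=rewrite | github.com/jakobfje/advent-of-code | python/2020/07.py | cntMasters
-- ===== SOURCE A (Python) =====
-- def cntMasters(ruleDict, bagType, masterSet=None):
--     if not masterSet:
--         masterSet = set()
--
--     cnt = 0
--     for rule in ruleDict.keys():
--         if rule not in masterSet and bagType in ruleDict[rule]:
--             masterSet.add(rule)
--             cnt += 1 + cntMasters(ruleDict, rule, masterSet)
--
--     return cnt
-- ===== SOURCE B (Python) =====
-- def cntMasters(ruleDict, bagType, masterSet=None):
--     # Round-based fixpoint saturation instead of A's mutating recursive DFS.
--     # Note: A mutates the caller's masterSet in place; B does not (return-value equivalence).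
--     blocked = masterSet if masterSet else set()
--     masters = set()
--     for _ in range(len(ruleDict)):
--         nxt = {rule for rule, contents in ruleDict.items()
--                if rule not in blocked
--                and (bagType in contents or any(m in contents for m in masters))}
--         if nxt == masters:
--             break
--         masters = nxt
--     return len(masters)
-- ===== Notes on version B (the rewrite author's own statement) =====
-- stated objective: alternative
-- what changed: A's mutating recursive DFS over the reverse-containment relation is replaced by a round-based monotone fixpoint saturation: repeatedly recompute the set of rules that directly contain bagType or an already-found master, until it stabilises.
import Mathlib
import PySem

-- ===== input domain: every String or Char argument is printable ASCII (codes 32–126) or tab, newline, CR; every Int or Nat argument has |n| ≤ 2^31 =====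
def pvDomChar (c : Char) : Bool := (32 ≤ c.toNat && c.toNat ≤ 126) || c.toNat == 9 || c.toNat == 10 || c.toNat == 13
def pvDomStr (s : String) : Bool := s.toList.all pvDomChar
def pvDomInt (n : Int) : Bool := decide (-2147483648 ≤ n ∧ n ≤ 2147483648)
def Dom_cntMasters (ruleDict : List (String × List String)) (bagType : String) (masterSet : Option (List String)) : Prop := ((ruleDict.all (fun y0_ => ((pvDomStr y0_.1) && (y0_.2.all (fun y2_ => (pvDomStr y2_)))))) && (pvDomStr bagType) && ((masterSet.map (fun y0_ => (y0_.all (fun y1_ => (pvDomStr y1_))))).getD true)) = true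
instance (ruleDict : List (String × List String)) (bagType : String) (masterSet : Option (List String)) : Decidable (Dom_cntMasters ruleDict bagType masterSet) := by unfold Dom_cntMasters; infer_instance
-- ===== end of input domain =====

-- B replaces A's mutating recursive DFS by a round-based fixpoint saturation (objective: alternative
-- algorithm, similar cost). A mutates the caller's masterSet set in place, B does not — the
-- equivalence proved here is about the return value only.


-- ===== PORT A =====
-- ruleDict[rule], for rule drawn from ruleDict.keys() (always present there)
def pvContents (d : PySem.Dict String (List String)) (r : String) : List String :=
  (PySem.Dict.get? d r).getD []

-- A's recursive DFS, with the shared mutable masterSet threaded as explicit state (the returned pair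
-- carries cnt and the set after mutation) and a fuel bounding the recursion depth; the fuel supplied
-- by cntMasters (number of keys + 1) always suffices, because each recursive call first adds a fresh
-- key of ruleDict to masterSet (A_go_spec below never reaches the 0-fuel branch).
def cntMastersGo (d : PySem.Dict String (List String)) (fuel : Nat) (keys : List String)
    (b : String) (cnt : Int) (S : PySem.Set String) : Int × PySem.Set String :=
  match fuel, keys with
  | _, [] => (cnt, S)
  | 0, _ :: _ => (cnt, S)      -- unreachable with the fuel cntMasters supplies
  | fuel + 1, rule :: rest =>
    -- if rule not in masterSet and bagType in ruleDict[rule]: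
    if ¬ PySem.Set.contains S rule ∧ (pvContents d rule).contains b then
      -- masterSet.add(rule); cnt += 1 + cntMasters(ruleDict, rule, masterSet)
      let p := cntMastersGo d fuel (PySem.Dict.keys d) rule 0 (PySem.Set.add S rule)
      cntMastersGo d (fuel + 1) rest b (cnt + 1 + p.1) p.2
    else
      cntMastersGo d (fuel + 1) rest b cnt S
  termination_by (fuel, keys.length)

def cntMasters (ruleDict : List (String × List String)) (bagType : String) (masterSet : Option (List String)) : Int :=
  let d := PySem.Dict.ofList ruleDict
  -- if not masterSet: masterSet = set()   (None and an empty set both become set())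
  let S0 : PySem.Set String := match masterSet with
    | none => PySem.Set.empty
    | some l => PySem.Set.ofList l
  (cntMastersGo d ((PySem.Dict.keys d).length + 1) (PySem.Dict.keys d) bagType 0 S0).1

-- ===== PORT B =====
-- {rule for rule, contents in ruleDict.items()
--   if rule not in blocked and (bagType in contents or any(m in contents for m in masters))}
def pvStep (d : PySem.Dict String (List String)) (b : String)
    (blocked : PySem.Set String) (masters : PySem.Set String) : PySem.Set String :=
  PySem.Set.ofList (((PySem.Dict.items d).filter
    (fun rc => ¬ PySem.Set.contains blocked rc.1 ∧
      (rc.2.contains b ∨ masters.any (fun m => rc.2.contains m)))).map (·.1))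

-- for _ in range(len(ruleDict)): nxt = {...}; if nxt == masters: break; masters = nxt
def pvLoop (d : PySem.Dict String (List String)) (b : String) (blocked : PySem.Set String) :
    Nat → PySem.Set String → PySem.Set String
  | 0, masters => masters
  | n + 1, masters =>
    let nxt := pvStep d b blocked masters
    if PySem.Set.equal nxt masters then masters else pvLoop d b blocked n nxt

def cntMasters_alt (ruleDict : List (String × List String)) (bagType : String) (masterSet : Option (List String)) : Int :=
  let d := PySem.Dict.ofList ruleDict
  -- blocked = masterSet if masterSet else set()
  let blocked : PySem.Set String := match masterSet with
    | none => PySem.Set.empty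
    | some l => PySem.Set.ofList l
  PySem.Set.len (pvLoop d bagType blocked (PySem.Dict.size d) PySem.Set.empty)

-- ===== PRECONDITION & SPEC =====
def Spec_cntMasters (ruleDict : List (String × List String)) (bagType : String) (masterSet : Option (List String)) (out : Int) : Prop := out = cntMasters_alt ruleDict bagType masterSet
instance (ruleDict : List (String × List String)) (bagType : String) (masterSet : Option (List String)) (out : Int) : Decidable (Spec_cntMasters ruleDict bagType masterSet out) := by unfold Spec_cntMasters; infer_instance

-- ===== CLAIM (what is proved, stated in full; the proofs are below) =====
def Claim_equal_cntMasters : Prop := ∀ (ruleDict : List (String × List String)) (bagType : String) (masterSet : Option (List String)), Dom_cntMasters ruleDict bagType masterSet → Spec_cntMasters ruleDict bagType masterSet (cntMasters ruleDict bagType masterSet)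

-- ===== LEMMAS AND PROOFS =====

inductive pvReach (d : PySem.Dict String (List String)) (S : List String) (b : String) : String → Prop
  | base (r : String) : r ∈ d.keys → b ∈ pvContents d r → r ∉ S → pvReach d S b r
  | step (m r : String) : pvReach d S b m → r ∈ d.keys → m ∈ pvContents d r → r ∉ S → pvReach d S b r

theorem pvReach_mono (d : PySem.Dict String (List String)) {S S' : List String} {b x : String}
    (hsub : ∀ y, y ∈ S → y ∈ S') (h : pvReach d S' b x) : pvReach d S b x := by
  induction h with
  | base r h1 h2 h3 => exact .base r h1 h2 (fun hx => h3 (hsub _ hx))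
  | step m r _ h1 h2 h3 ih => exact .step m r ih h1 h2 (fun hx => h3 (hsub _ hx))

theorem pvReach_trans (d : PySem.Dict String (List String)) {S : List String} {b c x : String}
    (hbc : pvReach d S b c) (hcx : pvReach d S c x) : pvReach d S b x := by
  induction hcx with
  | base r h1 h2 h3 => exact .step c r hbc h1 h2 h3
  | step m r _ h1 h2 h3 ih => exact .step m r ih h1 h2 h3

theorem pvFilterLe {l : List String} {p q : String → Bool}
    (himp : ∀ x, q x = true → p x = true) : (l.filter q).length ≤ (l.filter p).length := by
  rw [← List.countP_eq_length_filter, ← List.countP_eq_length_filter]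
  exact List.countP_mono_left (fun x _ hx => himp x hx)

theorem pvFilterLt {l : List String} {p q : String → Bool}
    (himp : ∀ x, q x = true → p x = true) {a : String} (ha : a ∈ l) (hpa : p a = true)
    (hqa : q a = false) : (l.filter q).length < (l.filter p).length := by
  induction l with
  | nil => cases ha
  | cons y ys ih =>
    have hmono : (ys.filter q).length ≤ (ys.filter p).length := pvFilterLe himp
    rcases List.mem_cons.mp ha with rfl | ha'
    · simp only [List.filter_cons, hpa, hqa]
      simpa using Nat.lt_succ_of_le hmono
    · have := ih ha'
      by_cases hq : q y = true
      · simp [hq, himp y hq]; omega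
      · simp only [List.filter_cons, Bool.not_eq_true] at hq ⊢
        rw [hq]
        by_cases hp : p y = true <;> simp [hp] <;> omega

theorem A_go_spec (d : PySem.Dict String (List String)) :
    ∀ (fuel : Nat) (keys : List String) (b : String) (S : PySem.Set String) (cnt : Int),
    (∀ r ∈ keys, r ∈ d.keys) →
    (d.keys.filter (fun r => !(PySem.Set.contains S r))).length < fuel →
    ∃ added : List String,
      cntMastersGo d fuel keys b cnt S = (cnt + added.length, S ++ added) ∧
      added.Nodup ∧
      (∀ x ∈ added, x ∉ S) ∧
      (∀ x ∈ added, pvReach d S b x) ∧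
      (∀ r ∈ keys, b ∈ pvContents d r → r ∈ S ++ added) ∧
      (∀ x ∈ added, ∀ r ∈ d.keys, x ∈ pvContents d r → r ∈ S ++ added) := by
  intro fuel
  induction fuel with
  | zero => intro keys b S cnt _ hfuel; omega
  | succ fuel ihf =>
    intro keys
    induction keys with
    | nil =>
      intro b S cnt _ _
      exact ⟨[], by simp [cntMastersGo], by simp, by simp, by simp, by simp, by simp⟩
    | cons rule rest ihk =>
      intro b S cnt hk hfuel
      by_cases hc : ¬ PySem.Set.contains S rule ∧ (pvContents d rule).contains b
      · -- the branch that adds rule and recurses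
        have hruleK : rule ∈ d.keys := hk rule (List.mem_cons_self ..)
        have hruleS : rule ∉ S := by
          intro h; exact hc.1 (List.contains_iff_mem.mpr h)
        have hbc : b ∈ pvContents d rule := List.contains_iff_mem.mp hc.2
        have hadd : PySem.Set.add S rule = S ++ [rule] := by
          simp [PySem.Set.add, PySem.Set.contains, hruleS]
        -- fuel for the recursive call
        have hfuel1 : (d.keys.filter (fun r => !(PySem.Set.contains (S ++ [rule]) r))).length < fuel := by
          have := pvFilterLt (l := d.keys)
            (p := fun r => !(PySem.Set.contains S r)) (q := fun r => !(PySem.Set.contains (S ++ [rule]) r))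
            (fun x hx => by
              simp only [PySem.Set.contains, Bool.not_eq_true', ← Bool.not_eq_true,
                List.contains_iff_mem] at hx ⊢
              intro hm; exact hx (List.mem_append_left _ hm))
            hruleK
            (by simp [PySem.Set.contains, hruleS])
            (by simp [PySem.Set.contains])
          omega
        obtain ⟨a1, heq1, hnd1, hnotin1, hreach1, hclose1, hclose1'⟩ :=
          ihf (PySem.Dict.keys d) rule (S ++ [rule]) 0 (fun r hr => hr) hfuel1
        
        -- fuel for the continuation
        have hfuel2 : (d.keys.filter (fun r => !(PySem.Set.contains (S ++ [rule] ++ a1) r))).length < fuel + 1 := by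
          have := pvFilterLe (l := d.keys)
            (p := fun r => !(PySem.Set.contains S r)) (q := fun r => !(PySem.Set.contains (S ++ [rule] ++ a1) r))
            (fun x hx => by
              simp only [PySem.Set.contains, Bool.not_eq_true', ← Bool.not_eq_true,
                List.contains_iff_mem] at hx ⊢
              intro hm; exact hx (by simp [hm]))
          omega
        obtain ⟨a2, heq2, hnd2, hnotin2, hreach2, hclose2, hclose2'⟩ :=
          ihk b (S ++ [rule] ++ a1) (cnt + 1 + a1.length)
            (fun r hr => hk r (List.mem_cons_of_mem _ hr)) hfuel2
        refine ⟨rule :: a1 ++ a2, ?_, ?_, ?_, ?_, ?_, ?_⟩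
        · rw [cntMastersGo]
          simp only [if_pos hc, hadd, heq1, zero_add, heq2, Prod.mk.injEq]
          refine ⟨by simp; ring, by simp⟩
        · refine List.nodup_cons.mpr ⟨?_, List.Nodup.append hnd1 hnd2 ?_⟩
          · intro h
            rcases List.mem_append.mp h with h1 | h2
            · exact hnotin1 _ h1 (by simp)
            · exact hnotin2 _ h2 (by simp)
          · intro x hx1 hx2
            exact hnotin2 _ hx2 (by simp [hx1])
        · intro x hx
          rcases List.mem_cons.mp hx with rfl | hx
          · exact hruleS
          · rcases List.mem_append.mp hx with h1 | h2
            · exact fun hS => hnotin1 _ h1 (by simp [List.mem_append, hS])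
            · exact fun hS => hnotin2 _ h2 (by simp [List.mem_append, hS])
        · have hrr : pvReach d S b rule := .base rule hruleK hbc hruleS
          intro x hx
          rcases List.mem_cons.mp hx with rfl | hx
          · exact hrr
          · rcases List.mem_append.mp hx with h1 | h2
            · exact pvReach_trans d hrr
                (pvReach_mono d (fun y hy => List.mem_append_left _ hy) (hreach1 _ h1))
            · exact pvReach_mono d (fun y hy => by simp [hy]) (hreach2 _ h2)
        · intro r hr hbr
          rcases List.mem_cons.mp hr with rfl | hr'
          · simp
          · have := hclose2 r hr' hbr
            simp only [List.mem_append, List.mem_cons] at this ⊢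
            tauto
        · intro x hx r hrk hxr
          rcases List.mem_cons.mp hx with rfl | hx
          · have := hclose1 r hrk hxr
            simp only [List.mem_append, List.mem_cons] at this ⊢
            tauto
          · rcases List.mem_append.mp hx with h1 | h2
            · have := hclose1' _ h1 r hrk hxr
              simp only [List.mem_append, List.mem_cons] at this ⊢
              tauto
            · have := hclose2' _ h2 r hrk hxr
              simp only [List.mem_append, List.mem_cons] at this ⊢
              tauto
      · -- skipped
        obtain ⟨added, heq, hnd, hnotin, hreach, hclose, hclose'⟩ :=
          ihk b S cnt (fun r hr => hk r (List.mem_cons_of_mem _ hr)) hfuel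
        refine ⟨added, ?_, hnd, hnotin, hreach, ?_, hclose'⟩
        · rw [cntMastersGo]; simp only [if_neg hc]; exact heq
        · intro r hr hbr
          rcases List.mem_cons.mp hr with rfl | hr'
          · -- condition false but b ∈ contents r: then r ∈ S
            rcases not_and_or.mp hc with h | h
            · have : PySem.Set.contains S r = true := by
                by_contra h'; exact h (by simpa using h')
              exact List.mem_append_left _ (List.contains_iff_mem.mp this)
            · exact absurd (List.contains_iff_mem.mpr hbr) h
          · exact hclose r hr' hbr

theorem pvNodupLenLe {l1 l2 : List String} (h1 : l1.Nodup) (hs : l1 ⊆ l2) :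
    l1.length ≤ l2.length := by
  calc l1.length = l1.toFinset.card := (List.toFinset_card_of_nodup h1).symm
  _ ≤ l2.toFinset.card := Finset.card_le_card (fun a ha => by
      simp only [List.mem_toFinset] at ha ⊢; exact hs ha)
  _ ≤ l2.length := l2.toFinset_card_le

theorem mem_pvStep (d : PySem.Dict String (List String)) (hnd : d.keys.Nodup)
    (b : String) (blocked M : PySem.Set String) (x : String) :
    x ∈ pvStep d b blocked M ↔
      x ∈ d.keys ∧ x ∉ blocked ∧
        (b ∈ pvContents d x ∨ ∃ m ∈ M, m ∈ pvContents d x) := by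
  simp only [pvStep, PySem.Set.mem_ofList, List.mem_map, List.mem_filter]
  constructor
  · rintro ⟨⟨r, c⟩, ⟨hmem, hcond⟩, rfl⟩
    have hcon : pvContents d r = c := by
      simp [pvContents, PySem.Dict.get?_of_mem_items d hmem hnd]
    simp only [PySem.Set.contains, decide_eq_true_eq, List.contains_iff_mem,
      List.any_eq_true] at hcond
    exact ⟨PySem.Dict.mem_keys_of_mem_items d hmem, hcond.1, by
      rcases hcond.2 with h | ⟨m, hm, hmc⟩
      · exact Or.inl (hcon ▸ h)
      · exact Or.inr ⟨m, hm, hcon ▸ hmc⟩⟩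
  · rintro ⟨hkx, hbl, hrest⟩
    simp only [PySem.Dict.keys, List.mem_map] at hkx
    obtain ⟨⟨r, c⟩, hmem, rfl⟩ := hkx
    have hcon : pvContents d r = c := by
      simp [pvContents, PySem.Dict.get?_of_mem_items d hmem hnd]
    refine ⟨(r, c), ⟨hmem, ?_⟩, rfl⟩
    simp only [PySem.Set.contains, decide_eq_true_eq, List.contains_iff_mem,
      List.any_eq_true]
    rw [← hcon]
    exact ⟨hbl, by
      rcases hrest with h | ⟨m, hm, hmc⟩
      · exact Or.inl h
      · exact Or.inr ⟨m, hm, hmc⟩⟩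

theorem pvStep_nodup (d : PySem.Dict String (List String)) (b : String)
    (blocked M : PySem.Set String) : (pvStep d b blocked M).Nodup :=
  PySem.Set.nodup_ofList _

theorem pvStep_mono (d : PySem.Dict String (List String)) (hnd : d.keys.Nodup)
    (b : String) (blocked : PySem.Set String) {M M' : PySem.Set String}
    (h : ∀ y ∈ M, y ∈ M') : ∀ x ∈ pvStep d b blocked M, x ∈ pvStep d b blocked M' := by
  intro x hx
  rw [mem_pvStep d hnd] at hx ⊢
  rcases hx with ⟨h1, h2, h3 | ⟨m, hm, hmc⟩⟩
  · exact ⟨h1, h2, Or.inl h3⟩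
  · exact ⟨h1, h2, Or.inr ⟨m, h m hm, hmc⟩⟩

theorem B_loop (d : PySem.Dict String (List String)) (hnd : d.keys.Nodup)
    (b : String) (blocked : PySem.Set String) :
    ∀ (n : Nat) (M : PySem.Set String), M.Nodup →
    (∀ x ∈ M, x ∈ pvStep d b blocked M) →
    (∀ x ∈ M, pvReach d blocked b x) →
    ((pvStep d b blocked d.keys).filter (fun r => !(PySem.Set.contains M r))).length ≤ n →
    (pvLoop d b blocked n M).Nodup ∧
      (∀ x ∈ pvLoop d b blocked n M, pvReach d blocked b x) ∧
      (∀ x ∈ pvStep d b blocked (pvLoop d b blocked n M), x ∈ pvLoop d b blocked n M) := by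
  intro n
  induction n with
  | zero =>
    intro M hndM hsub hreach hmeas
    simp only [pvLoop]
    refine ⟨hndM, hreach, ?_⟩
    have hMkeys : ∀ y ∈ M, y ∈ d.keys := fun y hy => ((mem_pvStep d hnd b blocked M y).mp (hsub y hy)).1
    have hUM : ∀ u ∈ pvStep d b blocked d.keys, u ∈ M := by
      intro u hu
      by_contra hns
      have : u ∈ (pvStep d b blocked d.keys).filter (fun r => !(PySem.Set.contains M r)) := by
        simp [List.mem_filter, hu, PySem.Set.contains, hns]
      have := List.length_pos_of_mem this
      omega
    intro x hx
    exact hUM x (pvStep_mono d hnd b blocked hMkeys x hx)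
  | succ n ih =>
    intro M hndM hsub hreach hmeas
    simp only [pvLoop]
    by_cases heq : PySem.Set.equal (pvStep d b blocked M) M = true
    · rw [if_pos heq]
      have hsub' : ∀ x ∈ pvStep d b blocked M, x ∈ M := by
        have := (Bool.and_eq_true ..).mp heq |>.1
        simp only [PySem.Set.issubset, List.all_eq_true, PySem.Set.contains,
          List.contains_iff_mem] at this
        exact fun x hx => by simpa using this x hx
      exact ⟨hndM, hreach, hsub'⟩
    · rw [if_neg heq]
      have hMkeys : ∀ y ∈ M, y ∈ d.keys := fun y hy => ((mem_pvStep d hnd b blocked M y).mp (hsub y hy)).1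
      set nxt := pvStep d b blocked M with hnxt
      have hMnxt : ∀ y ∈ M, y ∈ nxt := hsub
      have hnxtU : ∀ y ∈ nxt, y ∈ pvStep d b blocked d.keys :=
        pvStep_mono d hnd b blocked hMkeys
      -- a witness in nxt but not in M
      have hwit : ∃ w, w ∈ nxt ∧ w ∉ M := by
        by_contra hno
        rw [not_exists] at hno
        simp only [not_and, not_not] at hno
        apply heq
        simp only [PySem.Set.equal, Bool.and_eq_true, PySem.Set.issubset, List.all_eq_true,
          PySem.Set.contains, List.contains_iff_mem]
        exact ⟨fun x hx => by simpa using hno x (by simpa using hx),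
               fun x hx => by simpa using hMnxt x (by simpa using hx)⟩
      obtain ⟨w, hw1, hw2⟩ := hwit
      have hmeas' : ((pvStep d b blocked d.keys).filter (fun r => !(PySem.Set.contains nxt r))).length < ((pvStep d b blocked d.keys).filter (fun r => !(PySem.Set.contains M r))).length := by
        refine pvFilterLt ?_ (hnxtU w hw1) ?_ ?_
        · intro x hx
          simp only [PySem.Set.contains, Bool.not_eq_true', ← Bool.not_eq_true,
            List.contains_iff_mem] at hx ⊢
          exact fun hm => hx (hMnxt x hm)
        · simp [PySem.Set.contains, hw2]
        · simp [PySem.Set.contains, hw1]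
      refine ih nxt (pvStep_nodup d b blocked M) ?_ ?_ (by omega)
      · exact fun x hx => pvStep_mono d hnd b blocked hMnxt x hx
      · intro x hx
        rw [mem_pvStep d hnd] at hx
        rcases hx with ⟨h1, h2, h3 | ⟨m, hm, hmc⟩⟩
        · exact .base x h1 h3 h2
        · exact .step m x (hreach m hm) h1 hmc h2

theorem pvReach_not_mem {d : PySem.Dict String (List String)} {S : List String} {b x : String}
    (h : pvReach d S b x) : x ∉ S := by
  cases h with
  | base r _ _ h3 => exact h3
  | step m r _ _ _ h3 => exact h3

theorem pvEquivCore (d : PySem.Dict String (List String)) (hnd : d.keys.Nodup)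
    (b : String) (S0 : PySem.Set String) :
    (cntMastersGo d (d.keys.length + 1) d.keys b 0 S0).1 =
      PySem.Set.len (pvLoop d b S0 (PySem.Dict.size d) PySem.Set.empty) := by
  obtain ⟨added, heq, hnda, hnotin, hreach, hclose, hclose'⟩ :=
    A_go_spec d (d.keys.length + 1) d.keys b S0 0 (fun r hr => hr)
      (by have := List.length_filter_le (fun r => !(PySem.Set.contains S0 r)) d.keys; omega)
  have hAmem : ∀ x, x ∈ added ↔ pvReach d S0 b x := by
    intro x
    refine ⟨hreach x, fun hr => ?_⟩
    have hx : x ∈ S0 ++ added := by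
      induction hr with
      | base r h1 h2 _ => exact hclose r h1 h2
      | step m r hm h1 h2 _ ih =>
        rcases List.mem_append.mp ih with h | h
        · exact absurd h (pvReach_not_mem hm)
        · exact hclose' m h r h1 h2
    rcases List.mem_append.mp hx with h | h
    · exact absurd h (pvReach_not_mem hr)
    · exact h
  have hsize : PySem.Dict.size d = d.keys.length := by
    simp [PySem.Dict.size, PySem.Dict.keys]
  have hUlen : ((pvStep d b S0 d.keys).filter (fun r => !(PySem.Set.contains PySem.Set.empty r))).length ≤ PySem.Dict.size d := by
    have hUsub : pvStep d b S0 d.keys ⊆ d.keys := by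
      intro u hu
      exact ((mem_pvStep d hnd b S0 d.keys u).mp hu).1
    have h1 : ((pvStep d b S0 d.keys).filter (fun r => !(PySem.Set.contains PySem.Set.empty r))).length ≤ (pvStep d b S0 d.keys).length :=
      List.length_filter_le _ _
    have h2 := pvNodupLenLe (pvStep_nodup d b S0 d.keys) hUsub
    omega
  obtain ⟨hndR, hreachR, hcloseR⟩ :=
    B_loop d hnd b S0 (PySem.Dict.size d) PySem.Set.empty
      (by simp [PySem.Set.empty]) (by simp [PySem.Set.empty]) (by simp [PySem.Set.empty]) hUlen
  set R := pvLoop d b S0 (PySem.Dict.size d) PySem.Set.empty with hR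
  have hBmem : ∀ x, x ∈ R ↔ pvReach d S0 b x := by
    intro x
    refine ⟨hreachR x, fun hr => ?_⟩
    induction hr with
    | base r h1 h2 h3 =>
      exact hcloseR r ((mem_pvStep d hnd b S0 R r).mpr ⟨h1, h3, Or.inl h2⟩)
    | step m r hm h1 h2 h3 ih =>
      exact hcloseR r ((mem_pvStep d hnd b S0 R r).mpr ⟨h1, h3, Or.inr ⟨m, ih, h2⟩⟩)
  have hperm : added.Perm R :=
    (List.perm_ext_iff_of_nodup hnda hndR).mpr (fun a => (hAmem a).trans (hBmem a).symm)
  rw [heq]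
  simp [PySem.Set.len, hperm.length_eq]

-- ===== VERDICT (by name: the statement is the Claim_ definition above) =====
theorem cntMasters_spec : Claim_equal_cntMasters := by
  intro ruleDict bagType masterSet _
  unfold Spec_cntMasters cntMasters cntMasters_alt
  exact pvEquivCore (PySem.Dict.ofList ruleDict) (PySem.Dict.nodup_keys_ofList ruleDict)
    bagType _
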